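-- pv_equiv track=rewrite | github.com/MrHamdulay/csc3-capstone | examples/data/Assignment_8/ntsten002/question2.py | countdoubles
-- ===== SOURCE A (Python) =====
-- def countdoubles(message):
--     if message == "":
--         return 0
--     if len(message) < 2:
--         return 0
--     elif (message[0] == message[1]):
--         return 1 + countdoubles(message[2:])
--     else:
--         return countdoubles(message[1:])
-- ===== SOURCE B (Python) =====
-- def countdoubles(message):
--     count = 0
--     i = 0
--     n = len(message)
--     while i + 1 < n:
--         if message[i] == message[i + 1]:
--             count += 1
--             i += 2
--         else:
--             i += 1
--     return count
-- ===== Notes on version B (the rewrite author's own statement) =====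
-- stated objective: faster
-- what changed: Replaced the recursion that slices the string on every step (quadratic copying) by a single iterative pass with an index pointer and a counter.
import Mathlib
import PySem

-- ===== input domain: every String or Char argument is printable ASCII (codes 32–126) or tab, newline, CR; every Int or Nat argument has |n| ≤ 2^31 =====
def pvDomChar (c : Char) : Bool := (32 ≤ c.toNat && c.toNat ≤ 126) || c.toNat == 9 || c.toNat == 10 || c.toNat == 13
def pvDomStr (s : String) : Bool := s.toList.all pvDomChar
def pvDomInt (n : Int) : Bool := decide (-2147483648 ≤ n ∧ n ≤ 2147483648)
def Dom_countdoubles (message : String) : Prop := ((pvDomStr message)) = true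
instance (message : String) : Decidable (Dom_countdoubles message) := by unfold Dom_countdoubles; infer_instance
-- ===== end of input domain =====

-- B replaces A's slicing recursion by a single iterative index-pointer pass (faster, asymptotic).

-- ===== PORT A =====
-- A's recursion: "" and length<2 both return 0 (the first two cases);
-- message[2:] / message[1:] are the tails below.
def countA : List Char → Int
  | [] => 0
  | [_] => 0
  | a :: b :: rest =>
    if a = b then 1 + countA rest else countA (b :: rest)

def countdoubles (message : String) : Int := countA message.toList

-- ===== PORT B =====
-- B's while loop over an index pointer, with the count accumulator.
def countB (s : List Char) (i : Nat) (count : Int) : Int :=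
  if h : i + 1 < s.length then
    if s[i]'(by omega) = s[i + 1]'h then countB s (i + 2) (count + 1)
    else countB s (i + 1) count
  else count
termination_by s.length - i

def countdoubles_alt (message : String) : Int := countB message.toList 0 0

-- ===== PRECONDITION & SPEC =====
def Spec_countdoubles (message : String) (out : Int) : Prop := out = countdoubles_alt message
instance (message : String) (out : Int) : Decidable (Spec_countdoubles message out) := by unfold Spec_countdoubles; infer_instance

-- ===== CLAIM (what is proved, stated in full; the proofs are below) =====
def Claim_equal_countdoubles : Prop := ∀ (message : String), Dom_countdoubles message → Spec_countdoubles message (countdoubles message)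

-- ===== LEMMAS AND PROOFS =====
lemma countB_eq (s : List Char) : ∀ (i : Nat) (c : Int),
    countB s i c = c + countA (s.drop i) := by
  have H : ∀ k i c, s.length - i ≤ k → countB s i c = c + countA (s.drop i) := by
    intro k
    induction k with
    | zero =>
      intro i c hk
      rw [countB, dif_neg (by omega)]
      have : s.drop i = [] := List.drop_eq_nil_of_le (by omega)
      simp [this, countA]
    | succ k ih =>
      intro i c hk
      by_cases h : i + 1 < s.length
      · have hd2 : s.drop i = s[i]'(by omega) :: s[i+1]'h :: s.drop (i + 2) := by
          rw [List.drop_eq_getElem_cons (l := s) (by omega : i < s.length),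
            List.drop_eq_getElem_cons (l := s) (by omega : i + 1 < s.length)]
        by_cases heq : s[i]'(by omega) = s[i + 1]'h
        · rw [countB, dif_pos h, if_pos heq, ih _ _ (by omega), hd2]
          simp [countA, heq]; ring
        · rw [countB, dif_pos h, if_neg heq, ih _ _ (by omega), hd2]
          simp [countA, heq]
      · rw [countB, dif_neg h]
        have hlen : (s.drop i).length ≤ 1 := by simp; omega
        match hd : s.drop i with
        | [] => simp [countA]
        | [_] => simp [countA]
        | a :: b :: t => rw [hd] at hlen; simp at hlen
  intro i c
  exact H (s.length - i) i c le_rfl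

-- ===== VERDICT (by name: the statement is the Claim_ definition above) =====
theorem countdoubles_spec : Claim_equal_countdoubles := by
  intro message _
  unfold Spec_countdoubles countdoubles countdoubles_alt
  rw [countB_eq]; simp
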